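-- pv_equiv track=rewrite | github.com/MrBrantCode/unitest_baseline | mut_generate/mist_train_cf/cf_45816/solution.py | alphabetize_and_count
-- ===== SOURCE A (Python) =====
-- def alphabetize_and_count(s):
--     sorted_string = "".join(sorted(s))
--     freq = {}
--     for char in sorted_string:
--         if char in freq:
--             freq[char] += 1
--         else:
--             freq[char] = 1
--     return sorted_string, freq
-- ===== SOURCE B (Python) =====
-- def alphabetize_and_count(s):
--     # One counting pass over the unsorted string, then sort only the distinct
--     # characters and emit each one's run; never sorts the full string.
--     counts = {}
--     for ch in s:
--         counts[ch] = counts.get(ch, 0) + 1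
--     freq = {}
--     pieces = []
--     for ch in sorted(counts):
--         freq[ch] = counts[ch]
--         pieces.append(ch * counts[ch])
--     return "".join(pieces), freq
-- ===== Notes on version B (the rewrite author's own statement) =====
-- stated objective: faster
-- what changed: Instead of sorting all n characters and re-walking the sorted string, B counts characters in a single pass over the unsorted string, sorts only the k distinct characters, and emits each character's run and frequency from the counts.
import Mathlib
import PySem

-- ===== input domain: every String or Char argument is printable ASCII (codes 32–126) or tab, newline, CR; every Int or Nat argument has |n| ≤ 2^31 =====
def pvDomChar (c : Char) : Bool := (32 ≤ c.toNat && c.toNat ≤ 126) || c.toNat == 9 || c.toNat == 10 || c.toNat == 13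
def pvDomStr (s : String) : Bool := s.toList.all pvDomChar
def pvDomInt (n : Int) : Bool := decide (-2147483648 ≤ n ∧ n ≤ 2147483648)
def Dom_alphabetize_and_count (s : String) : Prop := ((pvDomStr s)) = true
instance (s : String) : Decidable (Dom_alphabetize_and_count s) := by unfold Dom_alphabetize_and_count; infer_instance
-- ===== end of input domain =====

-- B counts characters in one pass and sorts only the distinct characters instead of
-- sorting the whole string (objective: faster for duplicate-heavy input).

-- ===== PORT A =====
-- sorted_string = "".join(sorted(s)); then a dict built by walking sorted_string.
def alphabetize_and_count (s : String) : String × (List (String × Int)) :=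
  let sortedChars := PySem.List.sorted s.toList (fun c => c) false
  let freq := sortedChars.foldl (fun (d : PySem.Dict String Int) c =>
      if d.contains c.toString then d.insert c.toString (d.getD c.toString 0 + 1)
      else d.insert c.toString 1) PySem.Dict.empty
  (String.ofList sortedChars, freq.items)

-- ===== PORT B =====
-- counts = one counting pass over s; keys sorted; freq and the run pieces built from counts.
-- (counts[ch] with ch a key of counts is exact as getD counts ch 0.)
def alphabetize_and_count_alt (s : String) : String × (List (String × Int)) :=
  let counts := s.toList.foldl (fun (d : PySem.Dict String Int) c =>
      d.insert c.toString (d.getD c.toString 0 + 1)) PySem.Dict.empty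
  let ks := PySem.List.sorted counts.keys (fun k => k) false
  let freq := ks.foldl (fun (d : PySem.Dict String Int) k =>
      d.insert k (counts.getD k 0)) PySem.Dict.empty
  let pieces := ks.foldl (fun (acc : List (List Char)) k =>
      acc ++ [PySem.List.pyRepeat k.toList (counts.getD k 0)]) []
  (String.ofList (PySem.Chars.join [] pieces), freq.items)

-- ===== PRECONDITION & SPEC =====
def Spec_alphabetize_and_count (s : String) (out : String × (List (String × Int))) : Prop := out = alphabetize_and_count_alt s
instance (s : String) (out : String × (List (String × Int))) : Decidable (Spec_alphabetize_and_count s out) := by unfold Spec_alphabetize_and_count; infer_instance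

-- ===== CLAIM (what is proved, stated in full; the proofs are below) =====
def Claim_equal_alphabetize_and_count : Prop := ∀ (s : String), Dom_alphabetize_and_count s → Spec_alphabetize_and_count s (alphabetize_and_count s)

-- ===== LEMMAS AND PROOFS =====

theorem toList_toString (c : Char) : (Char.toString c).toList = [c] := by
  simp [Char.toString]

theorem toString_injective : Function.Injective Char.toString := by
  intro a b h
  have := congrArg String.toList h
  simpa [toList_toString] using this

theorem toString_lt {c d : Char} (h : c < d) : c.toString < d.toString := by
  rw [String.lt_iff_toList_lt, toList_toString, toList_toString]
  constructor; simp [h]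

theorem toString_le {c d : Char} (h : c ≤ d) : c.toString ≤ d.toString := by
  rcases lt_or_eq_of_le h with h' | h'
  · exact le_of_lt (toString_lt h')
  · exact le_of_eq (by rw [h'])

theorem ofList_sublist {α : Type} [BEq α] [LawfulBEq α] (xs : List α) :
    (PySem.Set.ofList xs).Sublist xs := by
  induction xs with
  | nil => simp [PySem.Set.ofList_nil]
  | cons x xs ih =>
    rw [PySem.Set.ofList_cons]
    exact List.Sublist.cons₂ x (List.Sublist.trans List.filter_sublist ih)

theorem discard_map {α β : Type} [BEq α] [LawfulBEq α] [BEq β] [LawfulBEq β]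
    (f : α → β) (hf : Function.Injective f) (s : List α) (x : α) :
    PySem.Set.discard (s.map f) (f x) = (PySem.Set.discard s x).map f := by
  simp only [PySem.Set.discard, List.filter_map]
  congr 1
  apply List.filter_congr
  intro y _
  simp [hf.eq_iff]

theorem ofList_map {α β : Type} [BEq α] [LawfulBEq α] [BEq β] [LawfulBEq β]
    (f : α → β) (hf : Function.Injective f) (xs : List α) :
    PySem.Set.ofList (xs.map f) = (PySem.Set.ofList xs).map f := by
  induction xs with
  | nil => simp [PySem.Set.ofList_nil]
  | cons x xs ih => rw [List.map_cons, PySem.Set.ofList_cons, PySem.Set.ofList_cons, ih,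
      discard_map f hf]; rfl

theorem join_nil_flatten (ps : List (List Char)) : PySem.Chars.join [] ps = ps.flatten := by
  induction ps with
  | nil => simp [PySem.Chars.join_nil]
  | cons p ps ih =>
    cases ps with
    | nil => simp [PySem.Chars.join_singleton]
    | cons q qs => rw [PySem.Chars.join_cons_cons, ih]; simp

theorem count_flatten_replicate {α : Type} [BEq α] [LawfulBEq α]
    (D : List α) (hD : D.Nodup) (n : α → Nat) (d : α) :
    ((D.map (fun c => List.replicate (n c) c)).flatten).count d
      = if d ∈ D then n d else 0 := by
  induction D with
  | nil => simp
  | cons c D ih =>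
    simp only [List.map_cons, List.flatten_cons, List.count_append,
      List.count_replicate]
    rcases List.nodup_cons.mp hD with ⟨hc, hD'⟩
    by_cases h : d = c
    · subst h
      simp [ih hD', hc]
    · simp [h, Ne.symm h, ih hD']

-- the sorted string is the concatenation of the runs of its distinct characters
theorem sorted_flatten_runs (L : List Char) (hL : L.Pairwise (· ≤ ·)) :
    ((PySem.Set.ofList L).map (fun c => List.replicate (L.count c) c)).flatten = L := by
  have hnd : (PySem.Set.ofList L).Nodup := PySem.Set.nodup_ofList L
  have hsub := ofList_sublist L
  have hple : (PySem.Set.ofList L).Pairwise (· ≤ ·) := hL.sublist hsub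
  have hplt : (PySem.Set.ofList L).Pairwise (· < ·) :=
    (hple.and hnd).imp (fun h => lt_of_le_of_ne h.1 h.2)
  apply List.Perm.eq_of_pairwise (le := (· ≤ ·))
      (fun a b _ _ h1 h2 => le_antisymm h1 h2)
  · rw [List.pairwise_flatten]
    constructor
    · intro l hl
      rcases List.mem_map.mp hl with ⟨c, _, rfl⟩
      rw [List.pairwise_replicate]
      exact Or.inr le_rfl
    · rw [List.pairwise_map]
      refine hplt.imp_of_mem ?_
      intro a b _ _ hab x hx y hy
      rw [List.eq_of_mem_replicate hx, List.eq_of_mem_replicate hy]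
      exact le_of_lt hab
  · exact hL
  · rw [List.perm_iff_count]
    intro a
    rw [count_flatten_replicate _ hnd]
    by_cases h : a ∈ L
    · simp [PySem.Set.mem_ofList, h]
    · simp [PySem.Set.mem_ofList, h, List.count_eq_zero_of_not_mem h]

theorem pairwise_lt_ofList {α : Type} [BEq α] [LawfulBEq α] [LinearOrder α]
    (l : List α) (h : l.Pairwise (· ≤ ·)) :
    (PySem.Set.ofList l).Pairwise (· < ·) :=
  ((h.sublist (ofList_sublist l)).and (PySem.Set.nodup_ofList l)).imp
    (fun h => lt_of_le_of_ne h.1 h.2)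

theorem counting_fold_eq_counter (L : List Char) :
    L.foldl (fun (d : PySem.Dict String Int) c =>
        d.insert c.toString (d.getD c.toString 0 + 1)) PySem.Dict.empty
      = PySem.Dict.counter (L.map Char.toString) := by
  rw [← PySem.Dict.foldl_insert_getD_add_one_eq_counter, List.foldl_map]

theorem branch_fold_eq_counter (L : List Char) :
    L.foldl (fun (d : PySem.Dict String Int) c =>
        if d.contains c.toString then d.insert c.toString (d.getD c.toString 0 + 1)
        else d.insert c.toString 1) PySem.Dict.empty
      = PySem.Dict.counter (L.map Char.toString) := by
  rw [← counting_fold_eq_counter]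
  apply PySem.List.foldl_congr_mem
  intro d c _
  by_cases h : d.contains c.toString = true
  · rw [if_pos h]
  · rw [if_neg h, PySem.Dict.getD_of_not_contains d 0 (by simpa using h)]
    norm_num

theorem alphabetize_and_count_spec : Claim_equal_alphabetize_and_count := by
  intro s _
  unfold Spec_alphabetize_and_count alphabetize_and_count alphabetize_and_count_alt
  set L := PySem.List.sorted s.toList (fun c => c) false
  have hperm : L.Perm s.toList := PySem.List.sorted_perm _ _ _
  have hpermM : (L.map Char.toString).Perm (s.toList.map Char.toString) := hperm.map _
  have hLpw : L.Pairwise (· ≤ ·) := PySem.List.sorted_pairwise s.toList (fun c => c)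
  have hMpw : (L.map Char.toString).Pairwise (· ≤ ·) :=
    hLpw.map _ (fun a b hab => toString_le hab)
  -- the sorted key list of B is A's insertion order of distinct keys
  have hK : PySem.List.sorted (PySem.Set.ofList (s.toList.map Char.toString)) (fun k => k) false
      = PySem.Set.ofList (L.map Char.toString) := by
    apply PySem.List.sorted_eq_of_perm_of_pairwise_lt
    · rw [List.perm_ext_iff_of_nodup (PySem.Set.nodup_ofList _) (PySem.Set.nodup_ofList _)]
      intro a
      simp only [PySem.Set.mem_ofList]
      exact hpermM.mem_iff
    · exact pairwise_lt_ofList _ hMpw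
  simp only [branch_fold_eq_counter, counting_fold_eq_counter, PySem.Dict.keys_counter, hK,
    PySem.List.foldl_append_singleton_eq_map, List.nil_append]
  refine congrArg₂ Prod.mk ?_ ?_
  · -- the strings agree
    rw [join_nil_flatten]
    congr 1
    rw [ofList_map Char.toString toString_injective, List.map_map]
    rw [show ((PySem.Set.ofList L).map
          ((fun k => PySem.List.pyRepeat k.toList
              ((PySem.Dict.counter (s.toList.map Char.toString)).getD k 0)) ∘ Char.toString))
        = (PySem.Set.ofList L).map (fun c => List.replicate (L.count c) c) from ?_]
    · exact (sorted_flatten_runs L hLpw).symm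
    · apply List.map_congr_left
      intro c _
      simp only [Function.comp_apply, toList_toString, PySem.Dict.getD_counter,
        PySem.List.pyRepeat_singleton, Int.toNat_natCast]
      rw [List.count_map_of_injective _ _ toString_injective, hperm.count_eq]
  · -- the dicts agree
    rw [PySem.Dict.items_counter,
      PySem.Dict.items_foldl_insert_fresh _ (fun k => k) _ _
        (fun a _ => PySem.Dict.contains_empty a) (by simp)]
    apply List.map_congr_left
    intro k _
    simp only [PySem.Dict.getD_counter]
    rw [hpermM.count_eq]

-- ===== VERDICT (by name: the statement is the Claim_ definition above) =====
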